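-- pv_equiv track=rewrite | github.com/2719104587/Hallucination | hallucination/update_indel.py | update_motif_gaps
-- ===== SOURCE A (Python) =====
-- from typing import List
--
-- def update_motif_gaps(sum_length: int, paste_locs_list: List[List[int]]):
--     motif_gaps = []
--     sign_index = 0
--     for paste_loc in paste_locs_list:
--         motif_gaps.append(paste_loc[0] - sign_index)
--         sign_index = paste_loc[1]
--     motif_gaps.append(sum_length - sign_index)
--     return motif_gaps
-- ===== SOURCE B (Python) =====
-- from typing import List
--
-- def update_motif_gaps(sum_length: int, paste_locs_list: List[List[int]]):
--     # Right recursion: the last gap is sum_length minus the last paste's end,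
--     # and everything before it is the same problem with the last paste's start
--     # playing the role of sum_length.
--     if not paste_locs_list:
--         return [sum_length]
--     last = paste_locs_list[-1]
--     return update_motif_gaps(last[0], paste_locs_list[:-1]) + [sum_length - last[1]]
-- ===== Notes on version B (the rewrite author's own statement) =====
-- stated objective: alternative
-- what changed: Replaces A's forward loop carrying a sign_index accumulator with a right recursion that peels the last paste pair, recursing with its start as the new boundary and appending the final gap, building the result back-to-front.
import Mathlib
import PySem

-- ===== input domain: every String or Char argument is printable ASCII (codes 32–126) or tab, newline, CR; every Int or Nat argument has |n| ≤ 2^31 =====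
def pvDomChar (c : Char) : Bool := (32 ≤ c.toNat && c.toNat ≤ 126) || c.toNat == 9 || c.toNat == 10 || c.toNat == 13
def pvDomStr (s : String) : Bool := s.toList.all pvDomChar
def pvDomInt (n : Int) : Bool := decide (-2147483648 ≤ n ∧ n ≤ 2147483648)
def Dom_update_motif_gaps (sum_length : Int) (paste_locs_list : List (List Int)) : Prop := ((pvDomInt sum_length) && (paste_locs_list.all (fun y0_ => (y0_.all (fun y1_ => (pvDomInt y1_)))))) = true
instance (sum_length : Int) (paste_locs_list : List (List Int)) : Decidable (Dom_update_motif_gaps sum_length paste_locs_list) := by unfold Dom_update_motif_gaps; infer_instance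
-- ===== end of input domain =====

-- B replaces A's forward accumulator loop with a right recursion peeling the last pair (alternative decomposition, same result).
-- ===== PORT A =====
def update_motif_gaps (sum_length : Int) (paste_locs_list : List (List Int)) : List Int :=
  let st := paste_locs_list.foldl
    (fun (acc : List Int × Int) paste_loc =>
      (acc.1 ++ [((PySem.List.pyGet? paste_loc 0).getD 0) - acc.2],
       (PySem.List.pyGet? paste_loc 1).getD 0))
    ([], 0)
  st.1 ++ [sum_length - st.2]

-- ===== PORT B =====
-- Right recursion on the list (Python's paste_locs_list[-1] / [:-1] become getLast? / dropLast).
def update_motif_gaps_alt (sum_length : Int) (paste_locs_list : List (List Int)) : List Int :=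
  match h : paste_locs_list.getLast? with
  | none => [sum_length]
  | some last =>
      update_motif_gaps_alt ((PySem.List.pyGet? last 0).getD 0) paste_locs_list.dropLast
        ++ [sum_length - ((PySem.List.pyGet? last 1).getD 0)]
termination_by paste_locs_list.length
decreasing_by
  have hne : paste_locs_list ≠ [] := by
    intro hnil; rw [hnil] at h; simp at h
  have hlen : 0 < paste_locs_list.length := List.length_pos_iff.mpr hne
  simp [List.length_dropLast]
  omega

-- ===== PRECONDITION & SPEC =====
-- Pre_ excludes inputs on which Python A raises IndexError: some inner list has fewer than 2 elements.
def Pre_update_motif_gaps (sum_length : Int) (paste_locs_list : List (List Int)) : Prop :=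
  ∀ p ∈ paste_locs_list, 2 ≤ p.length
instance (sum_length : Int) (paste_locs_list : List (List Int)) : Decidable (Pre_update_motif_gaps sum_length paste_locs_list) := by unfold Pre_update_motif_gaps; infer_instance
def pvWitness_update_motif_gaps : Int × List (List Int) := (10, [[2, 4], [6, 7]])
def Spec_update_motif_gaps (sum_length : Int) (paste_locs_list : List (List Int)) (out : List Int) : Prop := out = update_motif_gaps_alt sum_length paste_locs_list
instance (sum_length : Int) (paste_locs_list : List (List Int)) (out : List Int) : Decidable (Spec_update_motif_gaps sum_length paste_locs_list out) := by unfold Spec_update_motif_gaps; infer_instance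

-- ===== CLAIM =====
def Claim_equal_update_motif_gaps : Prop := ∀ (sum_length : Int) (paste_locs_list : List (List Int)), Dom_update_motif_gaps sum_length paste_locs_list → Pre_update_motif_gaps sum_length paste_locs_list → Spec_update_motif_gaps sum_length paste_locs_list (update_motif_gaps sum_length paste_locs_list)

-- ===== LEMMAS AND PROOFS =====
-- Unfolding equations for B's right recursion.
theorem update_motif_gaps_alt_nil (sum_length : Int) :
    update_motif_gaps_alt sum_length [] = [sum_length] := by
  unfold update_motif_gaps_alt; rfl

theorem update_motif_gaps_alt_concat (sum_length : Int) (ls : List (List Int)) (p : List Int) :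
    update_motif_gaps_alt sum_length (ls ++ [p]) =
      update_motif_gaps_alt ((PySem.List.pyGet? p 0).getD 0) ls
        ++ [sum_length - ((PySem.List.pyGet? p 1).getD 0)] := by
  rw [update_motif_gaps_alt.eq_def]
  split
  · next h => simp at h
  · next last h =>
      have hp : p = last := by simpa using h
      subst hp
      rw [List.dropLast_concat]

-- A appended with one more pair: the fold over ls ++ [p] splits into the fold over ls with p's start as the final boundary, plus the last gap.
theorem update_motif_gaps_concat (sum_length : Int) (ls : List (List Int)) (p : List Int) :
    update_motif_gaps sum_length (ls ++ [p]) =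
      update_motif_gaps ((PySem.List.pyGet? p 0).getD 0) ls
        ++ [sum_length - ((PySem.List.pyGet? p 1).getD 0)] := by
  simp [update_motif_gaps, List.foldl_append]

theorem update_motif_gaps_eq (sum_length : Int) (ls : List (List Int)) :
    update_motif_gaps sum_length ls = update_motif_gaps_alt sum_length ls := by
  induction ls using List.reverseRecOn generalizing sum_length with
  | nil => rw [update_motif_gaps_alt_nil]; simp [update_motif_gaps]
  | append_singleton ls p ih =>
      rw [update_motif_gaps_concat, ih, update_motif_gaps_alt_concat]

-- ===== VERDICT =====
theorem update_motif_gaps_spec : Claim_equal_update_motif_gaps := by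
  intro sum_length ls _ _
  exact update_motif_gaps_eq sum_length ls
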